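-- pv_equiv track=rewrite | github.com/Rudra-G-23/python-for-machine-learning | 005_Problem_Sloving_with_Python/Q-02/13.py | group_numbers_by_digits
-- ===== SOURCE A (Python) =====
-- def group_numbers_by_digits(nums):
--     if not nums:
--         return {}
--
--     result = {}
--     for n in nums:
--         count = len(str(n))
--         if count in result:
--             result[count].append(n)
--         else:
--             result[count] = [n]
--     return result
-- ===== SOURCE B (Python) =====
-- def group_numbers_by_digits(nums):
--     # Two-pass re-implementation: collect the distinct digit counts in first-occurrence
--     # order, then build each group with a filter over the whole list.
--     keys = list(dict.fromkeys(len(str(n)) for n in nums))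
--     return {k: [n for n in nums if len(str(n)) == k] for k in keys}
-- ===== Notes on version B (the rewrite author's own statement) =====
-- stated objective: alternative
-- what changed: Replaces the single-pass dict-accumulation loop by a two-pass scheme: first an ordered dedup of the digit-count keys, then one filter comprehension per key to build each group.
import Mathlib
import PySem

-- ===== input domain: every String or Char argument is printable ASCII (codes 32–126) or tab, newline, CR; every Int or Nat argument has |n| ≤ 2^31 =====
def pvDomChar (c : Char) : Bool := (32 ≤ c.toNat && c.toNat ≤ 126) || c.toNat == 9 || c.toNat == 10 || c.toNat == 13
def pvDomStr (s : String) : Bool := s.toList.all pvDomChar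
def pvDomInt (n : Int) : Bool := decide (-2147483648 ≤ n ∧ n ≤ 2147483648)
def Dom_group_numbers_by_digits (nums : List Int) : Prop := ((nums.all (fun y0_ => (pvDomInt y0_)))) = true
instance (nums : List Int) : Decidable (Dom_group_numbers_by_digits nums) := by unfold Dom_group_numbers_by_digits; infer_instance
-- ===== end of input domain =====

-- B replaces A's single-pass dict-accumulation by an ordered key-dedup followed by one filter per key (alternative decomposition, same results).


-- len(str(n)) as an Int (shared key function of both Pythons)
def pvDigitKey (n : Int) : Int := ((PySem.Int.toChars n).length : Int)

-- ===== PORT A =====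
def group_numbers_by_digits (nums : List Int) : List (Int × List Int) :=
  if nums = [] then []
  else
    (nums.foldl (fun (result : PySem.Dict Int (List Int)) n =>
        let count := pvDigitKey n
        match result.get? count with
        | some xs => result.insert count (xs ++ [n])   -- result[count].append(n)
        | none => result.insert count [n])             -- result[count] = [n]
      PySem.Dict.empty).items

-- ===== PORT B =====
def group_numbers_by_digits_alt (nums : List Int) : List (Int × List Int) :=
  (PySem.List.dedup (nums.map pvDigitKey)).map
    (fun k => (k, nums.filter (fun n => pvDigitKey n == k)))

-- ===== PRECONDITION & SPEC =====
def Spec_group_numbers_by_digits (nums : List Int) (out : List (Int × List Int)) : Prop := out = group_numbers_by_digits_alt nums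
instance (nums : List Int) (out : List (Int × List Int)) : Decidable (Spec_group_numbers_by_digits nums out) := by unfold Spec_group_numbers_by_digits; infer_instance

-- ===== CLAIM (what is proved, stated in full; the proofs are below) =====
def Claim_equal_group_numbers_by_digits : Prop := ∀ (nums : List Int), Dom_group_numbers_by_digits nums → Spec_group_numbers_by_digits nums (group_numbers_by_digits nums)

-- ===== LEMMAS AND PROOFS =====

-- A's loop body is exactly Dict.modify with default []
theorem pvStep_eq_modify (d : PySem.Dict Int (List Int)) (n : Int) :
    (match d.get? (pvDigitKey n) with
     | some xs => d.insert (pvDigitKey n) (xs ++ [n])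
     | none => d.insert (pvDigitKey n) [n]) =
    d.modify (pvDigitKey n) [] (· ++ [n]) := by
  unfold PySem.Dict.modify PySem.Dict.getD
  cases d.get? (pvDigitKey n) <;> simp

theorem pvFoldl_eq_pairs (nums : List Int) :
    (nums.foldl (fun (result : PySem.Dict Int (List Int)) n =>
        match result.get? (pvDigitKey n) with
        | some xs => result.insert (pvDigitKey n) (xs ++ [n])
        | none => result.insert (pvDigitKey n) [n]) PySem.Dict.empty) =
    ((nums.map (fun n => (pvDigitKey n, n))).foldl
        (fun (d : PySem.Dict Int (List Int)) p => d.modify p.1 [] (· ++ [p.2])) PySem.Dict.empty) := by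
  rw [List.foldl_map]
  apply PySem.List.foldl_congr_mem
  intro d n _
  exact pvStep_eq_modify d n

-- ===== VERDICT (by name: the statement is the Claim_ definition above) =====

theorem group_numbers_by_digits_spec : Claim_equal_group_numbers_by_digits := by
  intro nums _
  unfold Spec_group_numbers_by_digits group_numbers_by_digits group_numbers_by_digits_alt
  by_cases hnil : nums = []
  · subst hnil; rfl
  · simp only [hnil, if_false]
    rw [pvFoldl_eq_pairs]
    set pairs := nums.map (fun n => (pvDigitKey n, n)) with hpairs
    set d := pairs.foldl (fun (d : PySem.Dict Int (List Int)) p => d.modify p.1 [] (· ++ [p.2])) PySem.Dict.empty with hd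
    have hnd : d.keys.Nodup := by
      rw [hd, hpairs, List.foldl_map]
      exact PySem.Dict.nodup_keys_foldl_modify_key nums (fun n => pvDigitKey n) []
        (fun d n => (fun v => v ++ [n])) PySem.Dict.empty (by simp)
    have hkeys : d.keys = PySem.List.dedup (nums.map pvDigitKey) := by
      rw [hd, hpairs, List.foldl_map]
      rw [PySem.Dict.keys_foldl_modify_key]
      simp [PySem.Set.update_nil_left, PySem.List.dedup_eq_ofList]
    rw [PySem.Dict.items_eq_map_keys d hnd [], hkeys]
    apply List.map_congr_left
    intro k hk
    congr 1
    rw [hd, PySem.Dict.getD_foldl_modify_append, hpairs]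
    simp [PySem.Dict.getD_empty, List.filter_map, Function.comp_def]
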